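-- pv_equiv track=rewrite | github.com/sophiawisdom/girlsurgery | profit_analyzer.py | calculate_market_price
-- ===== SOURCE A (Python) =====
-- def calculate_market_price(auctions):
--     """Calculate the 10th lowest price point from a list of auctions"""
--     if not auctions:
--         return None
--
--     # For commodities, we need to account for quantity
--     price_quantity_pairs = []
--
--     for auction in auctions:
--         price = auction.get('unit_price', auction.get('buyout', None))
--         if price is None:
--             continue
--
--         quantity = auction['quantity']
--         price_quantity_pairs.append((price, quantity))
--
--     if not price_quantity_pairs:
--         return None
--
--     # Sort by price
--     price_quantity_pairs.sort(key=lambda x: x[0])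
--
--     # Find the 10th lowest price point
--     accumulated_quantity = 0
--     target_quantity = 10
--
--     for price, quantity in price_quantity_pairs:
--         accumulated_quantity += quantity
--         if accumulated_quantity >= target_quantity:
--             return price
--
--     # If we don't have 10 items total, return None
--     return None
-- ===== SOURCE B (Python) =====
-- def calculate_market_price(auctions):
--     """Calculate the 10th lowest price point from a list of auctions"""
--     if not auctions:
--         return None
--
--     # build (price, quantity) pairs, skipping auctions with no price
--     pairs = [(p, a['quantity'])
--              for a in auctions
--              for p in [a.get('unit_price', a.get('buyout', None))]
--              if p is not None]
--
--     if not pairs: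
--         return None
--
--     # repeated minimum selection: visit pairs in ascending price order
--     # without sorting; min() returns the first pair with the lowest price.
--     accumulated = 0
--     while pairs:
--         cheapest = min(pairs, key=lambda x: x[0])
--         accumulated += cheapest[1]
--         if accumulated >= 10:
--             return cheapest[0]
--         pairs.remove(cheapest)
--     return None
-- ===== Notes on version B (the rewrite author's own statement) =====
-- stated objective: alternative
-- what changed: Replaces A's sort-then-scan (build pairs, sort by price, accumulate in order) with repeated first-minimum selection that visits pairs in ascending price order without ever sorting, and builds the pairs with a comprehension instead of an append loop.
-- outside the precondition, e.g. on calculate_market_price([{'unit_price': 3}]): A raises KeyError, B raises KeyError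
import Mathlib
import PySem

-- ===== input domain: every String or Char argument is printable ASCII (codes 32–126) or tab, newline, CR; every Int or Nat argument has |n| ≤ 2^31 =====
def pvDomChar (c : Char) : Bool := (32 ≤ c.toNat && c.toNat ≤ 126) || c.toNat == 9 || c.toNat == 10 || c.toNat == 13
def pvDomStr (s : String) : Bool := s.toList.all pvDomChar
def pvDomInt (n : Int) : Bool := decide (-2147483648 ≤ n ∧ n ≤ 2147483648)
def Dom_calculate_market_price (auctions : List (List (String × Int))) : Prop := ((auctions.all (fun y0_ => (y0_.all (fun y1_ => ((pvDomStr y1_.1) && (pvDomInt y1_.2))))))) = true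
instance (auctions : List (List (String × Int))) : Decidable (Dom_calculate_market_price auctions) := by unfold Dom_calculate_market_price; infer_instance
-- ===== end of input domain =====

-- B replaces A's sort-then-scan by repeated first-minimum selection (no sort, same return value);
-- objective: alternative traversal, not faster.

-- ===== PORT A =====
-- auction.get('unit_price', auction.get('buyout', None)) : first-match association-list lookup
def cmpPriceA (a : List (String × Int)) : Option Int :=
  (List.lookup "unit_price" a).or (List.lookup "buyout" a)

-- the for-loop appending (price, quantity) pairs; auction['quantity'] is total only under Pre_
def cmpPairsA (auctions : List (List (String × Int))) : List (Int × Int) :=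
  auctions.foldl (fun acc a =>
    match cmpPriceA a with
    | none => acc
    | some p => acc ++ [(p, (List.lookup "quantity" a).getD 0)]) []

-- the final for-loop over the sorted pairs, accumulating quantity
def cmpScanA : List (Int × Int) → Int → Option Int
  | [], _ => none
  | (p, q) :: rest, acc => if 10 ≤ acc + q then some p else cmpScanA rest (acc + q)

def calculate_market_price (auctions : List (List (String × Int))) : Option Int :=
  if auctions.isEmpty then none
  else
    let pairs := cmpPairsA auctions
    if pairs.isEmpty then none
    else cmpScanA (PySem.List.sorted pairs (fun x => x.1) false) 0

-- ===== PORT B =====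
-- B's comprehension building the (price, quantity) pairs
def cmpPairsB (auctions : List (List (String × Int))) : List (Int × Int) :=
  auctions.filterMap (fun a =>
    match (List.lookup "unit_price" a).or (List.lookup "buyout" a) with
    | none => none
    | some p => some (p, (List.lookup "quantity" a).getD 0))

-- B's while loop: pick the first pair with the lowest price, accumulate, remove, repeat
def cmpSelB (pairs : List (Int × Int)) (acc : Int) : Option Int :=
  match hm : PySem.List.min? pairs (fun x => x.1) with
  | none => none
  | some m =>
    if 10 ≤ acc + m.2 then some m.1
    else cmpSelB (pairs.erase m) (acc + m.2)
termination_by pairs.length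
decreasing_by
  have hmem := PySem.List.min?_mem hm
  have h1 := List.length_erase_of_mem hmem
  have h2 := List.length_pos_of_mem hmem
  omega

def calculate_market_price_alt (auctions : List (List (String × Int))) : Option Int :=
  if auctions.isEmpty then none
  else
    let pairs := cmpPairsB auctions
    if pairs.isEmpty then none
    else cmpSelB pairs 0

-- ===== PRECONDITION & SPEC =====
-- Pre_ excludes exactly the inputs where A raises KeyError: an auction that carries a
-- 'unit_price' or 'buyout' key but no 'quantity' key (B raises there too).
def Pre_calculate_market_price (auctions : List (List (String × Int))) : Prop :=
  ∀ a ∈ auctions,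
    ((List.lookup "unit_price" a).or (List.lookup "buyout" a)).isSome = true →
    (List.lookup "quantity" a).isSome = true

instance (auctions : List (List (String × Int))) : Decidable (Pre_calculate_market_price auctions) := by
  unfold Pre_calculate_market_price; infer_instance

def pvWitness_calculate_market_price : (List (List (String × Int))) :=
  [[("unit_price", 3), ("quantity", 12)], [("buyout", 2), ("quantity", 4)], [("note", 0)]]

def Spec_calculate_market_price (auctions : List (List (String × Int))) (out : Option Int) : Prop := out = calculate_market_price_alt auctions
instance (auctions : List (List (String × Int))) (out : Option Int) : Decidable (Spec_calculate_market_price auctions out) := by unfold Spec_calculate_market_price; infer_instance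

-- ===== CLAIM (what is proved, stated in full; the proofs are below) =====
def Claim_equal_calculate_market_price : Prop := ∀ (auctions : List (List (String × Int))), Dom_calculate_market_price auctions → Pre_calculate_market_price auctions → Spec_calculate_market_price auctions (calculate_market_price auctions)

-- ===== LEMMAS AND PROOFS =====

-- A's append-loop builds the same pair list as B's comprehension
theorem cmpPairs_eq_aux (auctions : List (List (String × Int))) (acc : List (Int × Int)) :
    auctions.foldl (fun acc a =>
      match cmpPriceA a with
      | none => acc
      | some p => acc ++ [(p, (List.lookup "quantity" a).getD 0)]) acc
    = acc ++ cmpPairsB auctions := by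
  induction auctions generalizing acc with
  | nil => simp [cmpPairsB]
  | cons a t ih =>
    simp only [List.foldl_cons, cmpPairsB, List.filterMap_cons, cmpPriceA]
    cases (List.lookup "unit_price" a).or (List.lookup "buyout" a) with
    | none => simpa [cmpPairsB] using ih acc
    | some p => simpa [cmpPairsB] using ih (acc ++ [(p, (List.lookup "quantity" a).getD 0)])

theorem cmpPairs_eq (auctions : List (List (String × Int))) :
    cmpPairsA auctions = cmpPairsB auctions := by
  simpa using cmpPairs_eq_aux auctions []

-- min of l ++ [y] in one step (min? is a foldl)
theorem cmpMin_append_singleton (l : List (Int × Int)) (y : Int × Int) :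
    PySem.List.min? (l ++ [y]) (fun x => x.1)
    = match PySem.List.min? l (fun x => x.1) with
      | none => some y
      | some m => if y.1 < m.1 then some y else some m := by
  cases hr : PySem.List.min? l (fun x => x.1) with
  | none =>
    have hnil : l = [] := (PySem.List.min?_eq_none_iff _ _).mp hr
    subst hnil
    rfl
  | some m =>
    simp only [PySem.List.min?] at hr ⊢
    rw [List.foldl_append, hr]
    rfl

-- sorting l ++ [y] inserts y into sorted l (insertion sort is a foldl)
theorem cmpSorted_append_singleton (l : List (Int × Int)) (y : Int × Int) :
    PySem.List.sorted (l ++ [y]) (fun x => x.1) false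
    = PySem.List.insertBy (fun a b => decide (a.1 < b.1)) y
        (PySem.List.sorted l (fun x => x.1) false) := by
  rw [PySem.List.sorted_eq_foldl_insertBy, PySem.List.sorted_eq_foldl_insertBy,
    List.foldl_append]
  rfl

-- the key fact: the stable sort starts with the first minimum, followed by the
-- stable sort of the list with that occurrence removed
theorem cmpSorted_cons_min (l : List (Int × Int)) (m : Int × Int)
    (hm : PySem.List.min? l (fun x => x.1) = some m) :
    PySem.List.sorted l (fun x => x.1) false
    = m :: PySem.List.sorted (l.erase m) (fun x => x.1) false := by
  induction l using List.reverseRecOn with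
  | nil => simp [PySem.List.min?] at hm
  | append_singleton l y ih =>
    rw [cmpMin_append_singleton] at hm
    rw [cmpSorted_append_singleton]
    cases hl : PySem.List.min? l (fun x => x.1) with
    | none =>
      have hnil : l = [] := (PySem.List.min?_eq_none_iff _ _).mp hl
      subst hnil
      simp [PySem.List.min?] at hm
      subst hm
      simp [PySem.List.sorted, PySem.List.insertBy]
    | some m' =>
      rw [hl] at hm
      by_cases hy : y.1 < m'.1
      · simp only [hy, if_pos] at hm
        have hme : m = y := (Option.some.inj hm).symm
        subst hme
        -- m is strictly below everything in l, so it is not in l and goes first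
        have hnotmem : m ∉ l := by
          intro hmem
          exact absurd (PySem.List.min?_isMin hl m hmem) (by omega)
        rw [List.erase_append_right _ hnotmem]
        simp only [List.erase_cons_head, List.append_nil]
        cases hs : PySem.List.sorted l (fun x => x.1) false with
        | nil => simp [PySem.List.insertBy]
        | cons z zs =>
          have hz : z ∈ l := (PySem.List.mem_sorted l _ false z).mp (hs ▸ List.mem_cons_self ..)
          have : m.1 < z.1 := lt_of_lt_of_le hy (PySem.List.min?_isMin hl z hz)
          simp [PySem.List.insertBy, this]
      · simp only [hy] at hm
        have hme : m = m' := (Option.some.inj hm).symm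
        subst hme
        have hmem : m ∈ l := PySem.List.min?_mem hl
        rw [List.erase_append_left _ hmem, cmpSorted_append_singleton, ih hl]
        simp [PySem.List.insertBy, hy]

-- scanning the sorted list equals repeated first-minimum selection
theorem cmpScan_eq_sel (n : Nat) (l : List (Int × Int)) (acc : Int) (hn : l.length ≤ n) :
    cmpScanA (PySem.List.sorted l (fun x => x.1) false) acc = cmpSelB l acc := by
  induction n generalizing l acc with
  | zero =>
    have : l = [] := List.eq_nil_of_length_eq_zero (Nat.le_zero.mp hn)
    subst this
    simp [PySem.List.sorted, cmpScanA, cmpSelB, PySem.List.min?]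
  | succ n ih =>
    rw [cmpSelB]
    cases hm : PySem.List.min? l (fun x => x.1) with
    | none =>
      have : l = [] := (PySem.List.min?_eq_none_iff _ _).mp hm
      subst this
      simp [PySem.List.sorted, cmpScanA]
    | some m =>
      rw [cmpSorted_cons_min l m hm]
      have hmem := PySem.List.min?_mem hm
      have hlen : (l.erase m).length ≤ n := by
        have h1 := List.length_erase_of_mem hmem
        have h2 := List.length_pos_of_mem hmem
        omega
      obtain ⟨p, q⟩ := m
      simp only [cmpScanA]
      split
      · rfl
      · exact ih (l.erase (p, q)) (acc + q) hlen

-- ===== VERDICT (by name: the statement is the Claim_ definition above) =====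
theorem calculate_market_price_spec : Claim_equal_calculate_market_price := by
  intro auctions _ _
  unfold Spec_calculate_market_price calculate_market_price calculate_market_price_alt
  rw [cmpPairs_eq]
  by_cases h0 : auctions.isEmpty
  · simp [h0]
  · simp only [h0]
    by_cases h1 : (cmpPairsB auctions).isEmpty
    · simp [h1]
    · simp only [h1]
      exact cmpScan_eq_sel (cmpPairsB auctions).length _ 0 le_rfl
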